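-- pv_equiv track=rewrite | github.com/zdx3578/ARC-AGI-3-Agents | agents/templates/active_inference/representation.py | _changed_pixels_and_bbox
-- ===== SOURCE A (Python) =====
-- def _changed_pixels_and_bbox(
--     previous_frame: list[list[int]],
--     current_frame: list[list[int]],
-- ) -> tuple[int, tuple[int, int, int, int] | None]:
--     prev_h = len(previous_frame)
--     prev_w = len(previous_frame[0]) if previous_frame else 0
--     curr_h = len(current_frame)
--     curr_w = len(current_frame[0]) if current_frame else 0
--     union_h = max(prev_h, curr_h)
--     union_w = max(prev_w, curr_w)
--
--     changed = 0
--     min_x: int | None = None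
--     min_y: int | None = None
--     max_x: int | None = None
--     max_y: int | None = None
--
--     for y in range(union_h):
--         for x in range(union_w):
--             prev_value = (
--                 int(previous_frame[y][x]) if y < prev_h and x < prev_w else -1
--             )
--             curr_value = int(current_frame[y][x]) if y < curr_h and x < curr_w else -1
--             if prev_value == curr_value:
--                 continue
--             changed += 1
--             if min_x is None or x < min_x:
--                 min_x = x
--             if min_y is None or y < min_y:
--                 min_y = y
--             if max_x is None or x > max_x:
--                 max_x = x
--             if max_y is None or y > max_y:
--                 max_y = y
--
--     if changed <= 0:
--         return (0, None)
--     return (int(changed), (int(min_x), int(min_y), int(max_x), int(max_y)))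
-- ===== SOURCE B (Python) =====
-- def _changed_pixels_and_bbox(
--     previous_frame: list[list[int]],
--     current_frame: list[list[int]],
-- ) -> tuple[int, tuple[int, int, int, int] | None]:
--     prev_h = len(previous_frame)
--     prev_w = len(previous_frame[0]) if previous_frame else 0
--     curr_h = len(current_frame)
--     curr_w = len(current_frame[0]) if current_frame else 0
--     union_w = max(prev_w, curr_w)
--
--     def row_summary(y):
--         # (count of changed cells, first changed x, last changed x) for row y;
--         # -1 sentinels when the row has no change
--         cnt = 0
--         first = -1
--         last = -1
--         for x in range(union_w):
--             prev_value = int(previous_frame[y][x]) if y < prev_h and x < prev_w else -1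
--             curr_value = int(current_frame[y][x]) if y < curr_h and x < curr_w else -1
--             if prev_value != curr_value:
--                 cnt += 1
--                 if first < 0:
--                     first = x
--                 last = x
--         return (cnt, first, last)
--
--     rows = [row_summary(y) for y in range(max(prev_h, curr_h))]
--     changed = [(y, f, l) for y, (c, f, l) in enumerate(rows) if c > 0]
--     if not changed:
--         return (0, None)
--     total = sum(c for c, _, _ in rows)
--     min_x = min(f for _, f, _ in changed)
--     max_x = max(l for _, _, l in changed)
--     return (total, (min_x, changed[0][0], max_x, changed[-1][0]))
-- ===== Notes on version B (the rewrite author's own statement) =====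
-- stated objective: alternative
-- what changed: B replaces A's single scan with five global running accumulators by a two-stage row decomposition: each row is summarised independently as (change count, first changed x, last changed x), and the result is aggregated from the summary list (sum of counts, min/max of the row extrema, index of the first/last changed row).
import Mathlib
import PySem

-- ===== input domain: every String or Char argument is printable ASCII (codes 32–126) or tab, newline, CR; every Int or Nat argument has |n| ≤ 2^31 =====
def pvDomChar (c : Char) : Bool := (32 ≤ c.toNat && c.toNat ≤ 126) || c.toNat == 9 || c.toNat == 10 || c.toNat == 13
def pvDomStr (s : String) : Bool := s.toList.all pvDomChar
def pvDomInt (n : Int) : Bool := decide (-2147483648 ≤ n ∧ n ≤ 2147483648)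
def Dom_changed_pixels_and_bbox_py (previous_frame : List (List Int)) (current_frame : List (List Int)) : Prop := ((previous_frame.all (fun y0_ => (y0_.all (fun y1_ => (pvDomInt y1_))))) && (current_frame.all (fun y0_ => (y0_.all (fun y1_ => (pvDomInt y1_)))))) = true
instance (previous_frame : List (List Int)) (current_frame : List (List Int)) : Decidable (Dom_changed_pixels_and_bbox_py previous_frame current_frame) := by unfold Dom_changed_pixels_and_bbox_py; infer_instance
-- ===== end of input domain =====

-- B summarises each row independently as (count, first changed x, last changed x) and aggregates
-- the answer from that per-row summary list, instead of A's five inline global accumulators —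
-- an alternative two-stage decomposition with the same O(H*W) cost.

-- ===== PORT A =====
def changed_pixels_and_bbox_py (previous_frame : List (List Int)) (current_frame : List (List Int)) : Int × (Option (Int × Int × Int × Int)) :=
  let prev_h : Int := previous_frame.length
  let prev_w : Int := ((previous_frame.headD []).length : Int)
  let curr_h : Int := current_frame.length
  let curr_w : Int := ((current_frame.headD []).length : Int)
  let union_h : Int := max prev_h curr_h
  let union_w : Int := max prev_w curr_w
  let s : Int × Option Int × Option Int × Option Int × Option Int :=
    (PySem.List.pyRange 0 union_h 1).foldl (fun s y =>
      (PySem.List.pyRange 0 union_w 1).foldl (fun s x =>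
        -- previous_frame[y][x] / current_frame[y][x]: pyGetD, exact under Pre_ (indices in range)
        let prev_value : Int :=
          if y < prev_h ∧ x < prev_w then PySem.List.pyGetD (PySem.List.pyGetD previous_frame y []) x 0 else -1
        let curr_value : Int :=
          if y < curr_h ∧ x < curr_w then PySem.List.pyGetD (PySem.List.pyGetD current_frame y []) x 0 else -1
        if prev_value = curr_value then s
        else
          ( s.1 + 1
          , some (match s.2.1 with | none => x | some m => if x < m then x else m)
          , some (match s.2.2.1 with | none => y | some m => if y < m then y else m)
          , some (match s.2.2.2.1 with | none => x | some m => if x > m then x else m)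
          , some (match s.2.2.2.2 with | none => y | some m => if y > m then y else m))) s)
      (0, none, none, none, none)
  if s.1 ≤ 0 then (0, none)
  else (s.1, some (s.2.1.getD 0, s.2.2.1.getD 0, s.2.2.2.1.getD 0, s.2.2.2.2.getD 0))

-- ===== PORT B =====
def changed_pixels_and_bbox_py_alt (previous_frame : List (List Int)) (current_frame : List (List Int)) : Int × (Option (Int × Int × Int × Int)) :=
  let prev_h : Int := previous_frame.length
  let prev_w : Int := ((previous_frame.headD []).length : Int)
  let curr_h : Int := current_frame.length
  let curr_w : Int := ((current_frame.headD []).length : Int)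
  let union_w : Int := max prev_w curr_w
  -- row_summary(y): one pass over the row, (count, first changed x, last changed x), -1 sentinels
  let row_summary : Int → Int × Int × Int := fun y =>
    (PySem.List.pyRange 0 union_w 1).foldl (fun s x =>
      if (if y < prev_h ∧ x < prev_w then PySem.List.pyGetD (PySem.List.pyGetD previous_frame y []) x 0 else -1)
       ≠ (if y < curr_h ∧ x < curr_w then PySem.List.pyGetD (PySem.List.pyGetD current_frame y []) x 0 else -1)
      then (s.1 + 1, if s.2.1 < 0 then x else s.2.1, x)
      else s) (0, -1, -1)
  let rows : List (Int × Int × Int) := (PySem.List.pyRange 0 (max prev_h curr_h) 1).map row_summary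
  let changed : List (Int × Int × Int) :=
    ((PySem.List.enumerate rows 0).filter (fun p => p.2.1 > 0)).map (fun p => (p.1, p.2.2.1, p.2.2.2))
  if changed = [] then (0, none)
  else
    let total : Int := (rows.map (fun r => r.1)).sum
    let min_x : Int := (PySem.List.min? (changed.map (fun p => p.2.1)) (fun v => v)).getD 0
    let max_x : Int := (PySem.List.max? (changed.map (fun p => p.2.2)) (fun v => v)).getD 0
    (total, some (min_x, (changed.headD (0, 0, 0)).1, max_x, (changed.getLastD (0, 0, 0)).1))

-- ===== PRECONDITION & SPEC =====
-- Pre_ excludes exactly the ragged frames on which A raises IndexError: a row shorter than the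
-- first row of its frame is indexed at positions up to the first row's width.
def Pre_changed_pixels_and_bbox_py (previous_frame : List (List Int)) (current_frame : List (List Int)) : Prop :=
  (∀ r ∈ previous_frame, (previous_frame.headD []).length ≤ r.length) ∧
  (∀ r ∈ current_frame, (current_frame.headD []).length ≤ r.length)
instance (previous_frame : List (List Int)) (current_frame : List (List Int)) : Decidable (Pre_changed_pixels_and_bbox_py previous_frame current_frame) := by unfold Pre_changed_pixels_and_bbox_py; infer_instance

def pvWitness_changed_pixels_and_bbox_py : List (List Int) × List (List Int) := ([[1, 2], [3, 4]], [[1, 0], [3, 4]])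

def Spec_changed_pixels_and_bbox_py (previous_frame : List (List Int)) (current_frame : List (List Int)) (out : Int × (Option (Int × Int × Int × Int))) : Prop := out = changed_pixels_and_bbox_py_alt previous_frame current_frame
instance (previous_frame : List (List Int)) (current_frame : List (List Int)) (out : Int × (Option (Int × Int × Int × Int))) : Decidable (Spec_changed_pixels_and_bbox_py previous_frame current_frame out) := by unfold Spec_changed_pixels_and_bbox_py; infer_instance

-- ===== CLAIM (what is proved, stated in full; the proofs are below) =====
def Claim_equal_changed_pixels_and_bbox_py : Prop := ∀ (previous_frame : List (List Int)) (current_frame : List (List Int)), Dom_changed_pixels_and_bbox_py previous_frame current_frame → Pre_changed_pixels_and_bbox_py previous_frame current_frame → Spec_changed_pixels_and_bbox_py previous_frame current_frame (changed_pixels_and_bbox_py previous_frame current_frame)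

-- ===== LEMMAS AND PROOFS =====

-- A's loop step over a single cell (y, x), on state (changed, min_x, min_y, max_x, max_y)
def pvStepA (p : Int → Int → Bool) (s : Int × Option Int × Option Int × Option Int × Option Int)
    (c : Int × Int) : Int × Option Int × Option Int × Option Int × Option Int :=
  if p c.1 c.2 then
    ( s.1 + 1
    , some (match s.2.1 with | none => c.2 | some m => if c.2 < m then c.2 else m)
    , some (match s.2.2.1 with | none => c.1 | some m => if c.1 < m then c.1 else m)
    , some (match s.2.2.2.1 with | none => c.2 | some m => if c.2 > m then c.2 else m)
    , some (match s.2.2.2.2 with | none => c.1 | some m => if c.1 > m then c.1 else m))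
  else s

def pvOMin : List Int → Option Int
  | [] => none
  | a :: t => some (t.foldl min a)

def pvOMax : List Int → Option Int
  | [] => none
  | a :: t => some (t.foldl max a)

-- state reached by A's loop = length / extrema of the coordinate list of changed cells
def pvStateOf (L : List (Int × Int)) : Int × Option Int × Option Int × Option Int × Option Int :=
  ((L.length : Int), pvOMin (L.map (fun c => c.1)), pvOMin (L.map (fun c => c.2)),
   pvOMax (L.map (fun c => c.1)), pvOMax (L.map (fun c => c.2)))

def pvMerge (op : Int → Int → Int) : Option Int → Option Int → Option Int
  | none, b => b
  | some a, none => some a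
  | some a, some b => some (op a b)

theorem pvMerge_assoc (op : Int → Int → Int) (h : ∀ x y z, op (op x y) z = op x (op y z))
    (a b c : Option Int) : pvMerge op (pvMerge op a b) c = pvMerge op a (pvMerge op b c) := by
  cases a <;> cases b <;> cases c <;> simp [pvMerge, h]

theorem pv_foldl_min_pull (u : List Int) : ∀ a b, u.foldl min (min a b) = min a (u.foldl min b) := by
  induction u with
  | nil => intro a b; rfl
  | cons c u ih =>
    intro a b
    simp only [List.foldl_cons]
    rw [min_assoc, ih]

theorem pv_foldl_max_pull (u : List Int) : ∀ a b, u.foldl max (max a b) = max a (u.foldl max b) := by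
  induction u with
  | nil => intro a b; rfl
  | cons c u ih =>
    intro a b
    simp only [List.foldl_cons]
    rw [max_assoc, ih]

theorem pvOMin_cons (a : Int) (l : List Int) : pvOMin (a :: l) = pvMerge min (some a) (pvOMin l) := by
  cases l with
  | nil => rfl
  | cons b u => simp [pvOMin, pvMerge, List.foldl_cons, pv_foldl_min_pull]

theorem pvOMax_cons (a : Int) (l : List Int) : pvOMax (a :: l) = pvMerge max (some a) (pvOMax l) := by
  cases l with
  | nil => rfl
  | cons b u => simp [pvOMax, pvMerge, List.foldl_cons, pv_foldl_max_pull]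

theorem pvOMin_append2 (l₁ l₂ : List Int) : pvOMin (l₁ ++ l₂) = pvMerge min (pvOMin l₁) (pvOMin l₂) := by
  induction l₁ with
  | nil => simp [pvOMin, pvMerge]
  | cons a t ih =>
    rw [List.cons_append, pvOMin_cons, ih, pvOMin_cons,
      pvMerge_assoc min (fun x y z => min_assoc x y z)]

theorem pvOMax_append2 (l₁ l₂ : List Int) : pvOMax (l₁ ++ l₂) = pvMerge max (pvOMax l₁) (pvOMax l₂) := by
  induction l₁ with
  | nil => simp [pvOMax, pvMerge]
  | cons a t ih =>
    rw [List.cons_append, pvOMax_cons, ih, pvOMax_cons,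
      pvMerge_assoc max (fun x y z => max_assoc x y z)]

theorem pv_foldl_min_of_le (t : List Int) : ∀ a, (∀ x ∈ t, a ≤ x) → t.foldl min a = a := by
  induction t with
  | nil => intro a _; rfl
  | cons b u ih =>
    intro a h
    simp only [List.foldl_cons]
    rw [min_eq_left (h b (by simp))]
    exact ih a (fun x hx => h x (by simp [hx]))

theorem pv_foldl_max_getLastD (t : List Int) : ∀ a, (∀ x ∈ t, a ≤ x) → t.Pairwise (· ≤ ·) →
    t.foldl max a = t.getLastD a := by
  induction t with
  | nil => intro a _ _; rfl
  | cons b u ih =>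
    intro a h hp
    simp only [List.foldl_cons, List.getLastD_cons]
    rw [max_eq_right (h b (by simp))]
    exact ih b (List.pairwise_cons.mp hp).1 (List.pairwise_cons.mp hp).2

theorem pvOMin_sorted (l : List Int) (hs : l.Pairwise (· ≤ ·)) (hne : l ≠ []) :
    pvOMin l = some (l.headD (-1)) := by
  cases l with
  | nil => exact absurd rfl hne
  | cons a t =>
    simp only [pvOMin, List.headD_cons]
    rw [pv_foldl_min_of_le t a (List.pairwise_cons.mp hs).1]

theorem pvOMax_sorted (l : List Int) (hs : l.Pairwise (· ≤ ·)) (hne : l ≠ []) :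
    pvOMax l = some (l.getLastD (-1)) := by
  cases l with
  | nil => exact absurd rfl hne
  | cons a t =>
    simp only [pvOMax, List.getLastD_cons]
    exact congrArg some (pv_foldl_max_getLastD t a (List.pairwise_cons.mp hs).1
      (List.pairwise_cons.mp hs).2)

-- B's per-row fold = (count, first, last) of the filtered row positions
theorem pv_rowfold_pos (q : Int → Bool) (L : List Int) (hL : ∀ x ∈ L, (0 : Int) ≤ x) :
    ∀ (c f l : Int), 0 ≤ f →
    L.foldl (fun s x => if q x then (s.1 + 1, if s.2.1 < 0 then x else s.2.1, x) else s) (c, f, l)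
      = (c + ((L.filter q).length : Int), f, (L.filter q).getLastD l) := by
  induction L with
  | nil => intro c f l _; simp
  | cons a t ih =>
    intro c f l hf
    have ha := hL a (by simp)
    have ht : ∀ x ∈ t, (0 : Int) ≤ x := fun x hx => hL x (by simp [hx])
    by_cases hq : q a
    · simp only [List.foldl_cons, hq, if_pos, List.filter_cons_of_pos hq]
      have : ¬ (f < 0) := by omega
      rw [if_neg this, ih ht (c + 1) f a hf]
      simp only [List.length_cons, List.getLastD_cons]
      rw [show c + 1 + ((List.filter q t).length : Int)
            = c + (((List.filter q t).length + 1 : Nat) : Int) from by push_cast; ring]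
    · rw [List.foldl_cons, if_neg (by simp [hq]), List.filter_cons_of_neg (by simp [hq])]
      exact ih ht c f l hf

theorem pv_rowfold_neg (q : Int → Bool) (L : List Int) (hL : ∀ x ∈ L, (0 : Int) ≤ x) :
    ∀ (c l : Int),
    L.foldl (fun s x => if q x then (s.1 + 1, if s.2.1 < 0 then x else s.2.1, x) else s) (c, -1, l)
      = (c + ((L.filter q).length : Int), (L.filter q).headD (-1), (L.filter q).getLastD l) := by
  induction L with
  | nil => intro c l; simp
  | cons a t ih =>
    intro c l
    have ha := hL a (by simp)
    have ht : ∀ x ∈ t, (0 : Int) ≤ x := fun x hx => hL x (by simp [hx])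
    by_cases hq : q a
    · simp only [List.foldl_cons, hq, if_pos, List.filter_cons_of_pos hq]
      rw [if_pos (by omega : (-1 : Int) < 0), pv_rowfold_pos q t ht (c + 1) a a ha]
      simp only [List.length_cons, List.headD_cons, List.getLastD_cons]
      rw [show c + 1 + ((List.filter q t).length : Int)
            = c + (((List.filter q t).length + 1 : Nat) : Int) from by push_cast; ring]
    · rw [List.foldl_cons, if_neg (by simp [hq]), List.filter_cons_of_neg (by simp [hq])]
      exact ih ht c l

-- aggregation over the flattened blocks versus over the per-row summaries
theorem pv_flat_len (B : Int → List Int) (Ys : List Int) :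
    (((Ys.flatMap B).length : Int)) = (Ys.map (fun y => ((B y).length : Int))).sum := by
  induction Ys with
  | nil => simp
  | cons y t ih => simp only [List.flatMap_cons, List.length_append, List.map_cons, List.sum_cons, ← ih]; push_cast; ring

theorem pv_flat_minx (B : Int → List Int) (Ys : List Int)
    (hs : ∀ y ∈ Ys, (B y).Pairwise (· ≤ ·)) :
    pvOMin (Ys.flatMap B)
      = pvOMin ((Ys.filter (fun y => !(B y).isEmpty)).map (fun y => (B y).headD (-1))) := by
  induction Ys with
  | nil => rfl
  | cons y t ih =>
    have hty : ∀ y' ∈ t, (B y').Pairwise (· ≤ ·) := fun y' hy' => hs y' (by simp [hy'])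
    simp only [List.flatMap_cons, pvOMin_append2, ih hty]
    by_cases hB : B y = []
    · simp [hB, pvOMin, pvOMax, pvMerge, List.filter_cons]
    · rw [List.filter_cons_of_pos (by simp [List.isEmpty_iff, hB]), List.map_cons, pvOMin_cons,
        pvOMin_sorted (B y) (hs y (by simp)) hB]

theorem pv_flat_maxx (B : Int → List Int) (Ys : List Int)
    (hs : ∀ y ∈ Ys, (B y).Pairwise (· ≤ ·)) :
    pvOMax (Ys.flatMap B)
      = pvOMax ((Ys.filter (fun y => !(B y).isEmpty)).map (fun y => (B y).getLastD (-1))) := by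
  induction Ys with
  | nil => rfl
  | cons y t ih =>
    have hty : ∀ y' ∈ t, (B y').Pairwise (· ≤ ·) := fun y' hy' => hs y' (by simp [hy'])
    simp only [List.flatMap_cons, pvOMax_append2, ih hty]
    by_cases hB : B y = []
    · simp [hB, pvOMin, pvOMax, pvMerge, List.filter_cons]
    · rw [List.filter_cons_of_pos (by simp [List.isEmpty_iff, hB]), List.map_cons, pvOMax_cons,
        pvOMax_sorted (B y) (hs y (by simp)) hB]

theorem pv_foldl_max_of_le (t : List Int) : ∀ a, (∀ x ∈ t, x ≤ a) → t.foldl max a = a := by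
  induction t with
  | nil => intro a _; rfl
  | cons b u ih =>
    intro a h
    simp only [List.foldl_cons]
    rw [max_eq_left (h b (by simp))]
    exact ih a (fun x hx => h x (by simp [hx]))

theorem pv_flat_miny (B : Int → List Int) (Ys : List Int) (hp : Ys.Pairwise (· ≤ ·)) :
    pvOMin (Ys.flatMap (fun y => (B y).map (fun _ => y)))
      = (Ys.filter (fun y => !(B y).isEmpty)).head? := by
  induction Ys with
  | nil => rfl
  | cons y t ih =>
    have hpt := (List.pairwise_cons.mp hp).2
    have hle := (List.pairwise_cons.mp hp).1
    simp only [List.flatMap_cons, pvOMin_append2, ih hpt]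
    by_cases hB : B y = []
    · simp [hB, pvOMin, pvMerge, List.filter_cons]
    · rw [List.filter_cons_of_pos (by simp [List.isEmpty_iff, hB])]
      have hblk : pvOMin ((B y).map (fun _ => y)) = some y := by
        cases hBy : B y with
        | nil => exact absurd hBy hB
        | cons a u =>
          simp only [List.map_cons, pvOMin]
          rw [pv_foldl_min_of_le _ y (by intro x hx; simp at hx; omega)]
      rw [hblk]
      cases hf : t.filter (fun y => !(B y).isEmpty) with
      | nil => simp [pvMerge]
      | cons z w =>
        have hz : z ∈ t := List.mem_of_mem_filter (by rw [hf]; exact List.mem_cons_self)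
        simp [pvMerge, min_eq_left (hle z hz)]

theorem pv_flat_maxy (B : Int → List Int) (Ys : List Int) (hp : Ys.Pairwise (· ≤ ·)) :
    pvOMax (Ys.flatMap (fun y => (B y).map (fun _ => y)))
      = (Ys.filter (fun y => !(B y).isEmpty)).getLast? := by
  induction Ys with
  | nil => rfl
  | cons y t ih =>
    have hpt := (List.pairwise_cons.mp hp).2
    have hle := (List.pairwise_cons.mp hp).1
    simp only [List.flatMap_cons, pvOMax_append2, ih hpt]
    by_cases hB : B y = []
    · simp [hB, pvOMax, pvMerge, List.filter_cons]
    · rw [List.filter_cons_of_pos (by simp [List.isEmpty_iff, hB])]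
      have hblk : pvOMax ((B y).map (fun _ => y)) = some y := by
        cases hBy : B y with
        | nil => exact absurd hBy hB
        | cons a u =>
          simp only [List.map_cons, pvOMax]
          rw [pv_foldl_max_of_le _ y (by intro x hx; simp at hx; omega)]
      rw [hblk]
      cases hf : t.filter (fun y => !(B y).isEmpty) with
      | nil => simp [pvMerge]
      | cons z w =>
        have hgmem : (z :: w).getLast (by simp) ∈ z :: w := List.getLast_mem _
        have hgt : (z :: w).getLast (by simp) ∈ t := by
          have : (z :: w).getLast (by simp) ∈ t.filter (fun y => !(B y).isEmpty) := by
            rw [hf]; exact hgmem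
          exact List.mem_of_mem_filter this
        rw [List.getLast?_cons_cons, List.getLast?_eq_some_getLast (by simp)]
        simp [pvMerge, max_eq_right (hle _ hgt)]

theorem pv_nested_foldl {S : Type} (g : S → Int × Int → S) (L M : List Int) (s : S) :
    L.foldl (fun s y => M.foldl (fun s x => g s (y, x)) s) s
      = (L.flatMap (fun y => M.map (fun x => (y, x)))).foldl g s := by
  induction L generalizing s with
  | nil => rfl
  | cons a t ih => simp [List.foldl_append, List.foldl_map, ih]

theorem pvOMin_append (l : List Int) (x : Int) :
    some (match pvOMin l with | none => x | some m => if x < m then x else m)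
      = pvOMin (l ++ [x]) := by
  cases l with
  | nil => rfl
  | cons a t =>
    simp only [pvOMin, List.cons_append, List.foldl_append, List.foldl_cons, List.foldl_nil]
    congr 1
    simp only [min_def]
    split_ifs <;> omega

theorem pvOMax_append (l : List Int) (x : Int) :
    some (match pvOMax l with | none => x | some m => if x > m then x else m)
      = pvOMax (l ++ [x]) := by
  cases l with
  | cons a t =>
    simp only [pvOMax, List.cons_append, List.foldl_append, List.foldl_cons, List.foldl_nil]
    congr 1
    simp only [max_def]
    split_ifs <;> omega
  | nil => rfl

theorem pv_stateA (p : Int → Int → Bool) (C : List (Int × Int)) :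
    C.foldl (pvStepA p) (0, none, none, none, none)
      = pvStateOf ((C.filter (fun c => p c.1 c.2)).map (fun c => (c.2, c.1))) := by
  induction C using List.reverseRecOn with
  | nil => rfl
  | append_singleton t c ih =>
    rw [List.foldl_append, List.foldl_cons, List.foldl_nil, ih, List.filter_append]
    by_cases h : p c.1 c.2
    · simp only [List.filter_cons, h, List.filter_nil, List.map_append]
      unfold pvStepA pvStateOf
      simp only [h, if_pos, List.map_append, List.length_append, List.map_cons, List.map_nil]
      refine Prod.ext ?_ (Prod.ext ?_ (Prod.ext ?_ (Prod.ext ?_ ?_))) <;>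
        simp [pvOMin_append, pvOMax_append]
    · simp [pvStepA, h]

-- changed coordinates grouped by row
theorem pv_filter_cells (p : Int → Int → Bool) (Ys Xs : List Int) :
    ((Ys.flatMap (fun y => Xs.map (fun x => (y, x)))).filter (fun c => p c.1 c.2)).map
        (fun c => (c.2, c.1))
      = Ys.flatMap (fun y => (Xs.filter (fun x => p y x)).map (fun x => (x, y))) := by
  induction Ys with
  | nil => rfl
  | cons y t ih =>
    simp only [List.flatMap_cons, List.filter_append, List.map_append, ih, List.filter_map,
      List.map_map]
    congr 1

theorem pvMin_eq (l : List Int) : PySem.List.min? l (fun v => v) = pvOMin l := by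
  cases l with
  | nil => rfl
  | cons a t => rw [PySem.List.min?_id_cons]; rfl

theorem pvMax_eq (l : List Int) : PySem.List.max? l (fun v => v) = pvOMax l := by
  cases l with
  | nil => rfl
  | cons a t => rw [PySem.List.max?_id_cons]; rfl

theorem pv_enum_map_pyRange {α : Type} (f : Int → α) (b : Int) : ∀ (n : Nat) (a : Int), (b - a).toNat = n →
    PySem.List.enumerate ((PySem.List.pyRange a b 1).map f) a
      = (PySem.List.pyRange a b 1).map (fun y => (y, f y)) := by
  intro n
  induction n with
  | zero =>
    intro a hn
    rw [PySem.List.pyRange_one_eq_nil (by omega)]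
    rfl
  | succ m ih =>
    intro a hn
    rw [PySem.List.pyRange_one_cons (by omega)]
    simp only [List.map_cons, PySem.List.enumerate_cons]
    rw [ih (a + 1) (by omega)]

-- ===== VERDICT (by name: the statement is the Claim_ definition above) =====
theorem changed_pixels_and_bbox_py_spec : Claim_equal_changed_pixels_and_bbox_py := by
  intro pf cf _ _
  unfold Spec_changed_pixels_and_bbox_py changed_pixels_and_bbox_py changed_pixels_and_bbox_py_alt
  simp only
  set prev_h : Int := (pf.length : Int) with hph
  set prev_w : Int := ((pf.headD []).length : Int) with hpw
  set curr_h : Int := (cf.length : Int) with hch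
  set curr_w : Int := ((cf.headD []).length : Int) with hcw
  set W : Int := max prev_w curr_w with hW
  set H : Int := max prev_h curr_h with hH
  set p : Int → Int → Bool := fun y x =>
    decide (¬ (if y < prev_h ∧ x < prev_w then PySem.List.pyGetD (PySem.List.pyGetD pf y []) x 0 else -1)
      = (if y < curr_h ∧ x < curr_w then PySem.List.pyGetD (PySem.List.pyGetD cf y []) x 0 else -1)) with hp
  set Bx : Int → List Int := fun y => (PySem.List.pyRange 0 W 1).filter (fun x => p y x) with hBx
  set Ys : List Int := PySem.List.pyRange 0 H 1 with hYs
  set coords : List (Int × Int) := Ys.flatMap (fun y => (Bx y).map (fun x => (x, y))) with hcoords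
  -- facts about the rows
  have hsortedX : ∀ y, (Bx y).Pairwise (· ≤ ·) :=
    fun y => ((PySem.List.pairwise_lt_pyRange_one 0 W).filter _).imp (fun h => le_of_lt h)
  have hposX : ∀ y, ∀ x ∈ Bx y, (0 : Int) ≤ x := by
    intro y x hx
    have := List.mem_of_mem_filter hx
    exact (PySem.List.mem_pyRange_one.mp this).1
  have hsortedY : Ys.Pairwise (· ≤ ·) :=
    (PySem.List.pairwise_lt_pyRange_one 0 H).imp (fun h => le_of_lt h)
  -- A's loop computes pvStateOf coords
  have hA : Ys.foldl (fun s y =>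
      (PySem.List.pyRange 0 W 1).foldl (fun s x =>
        if (if y < prev_h ∧ x < prev_w then PySem.List.pyGetD (PySem.List.pyGetD pf y []) x 0 else -1)
         = (if y < curr_h ∧ x < curr_w then PySem.List.pyGetD (PySem.List.pyGetD cf y []) x 0 else -1)
        then s
        else
          ( s.1 + 1
          , some (match s.2.1 with | none => x | some m => if x < m then x else m)
          , some (match s.2.2.1 with | none => y | some m => if y < m then y else m)
          , some (match s.2.2.2.1 with | none => x | some m => if x > m then x else m)
          , some (match s.2.2.2.2 with | none => y | some m => if y > m then y else m))) s)
      ((0 : Int), (none : Option Int), (none : Option Int), (none : Option Int), (none : Option Int))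
      = pvStateOf coords := by
    have h1 : ∀ (s : Int × Option Int × Option Int × Option Int × Option Int) (y : Int),
        y ∈ Ys →
        (PySem.List.pyRange 0 W 1).foldl (fun s x =>
          if (if y < prev_h ∧ x < prev_w then PySem.List.pyGetD (PySem.List.pyGetD pf y []) x 0 else -1)
           = (if y < curr_h ∧ x < curr_w then PySem.List.pyGetD (PySem.List.pyGetD cf y []) x 0 else -1)
          then s
          else
            ( s.1 + 1
            , some (match s.2.1 with | none => x | some m => if x < m then x else m)
            , some (match s.2.2.1 with | none => y | some m => if y < m then y else m)
            , some (match s.2.2.2.1 with | none => x | some m => if x > m then x else m)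
            , some (match s.2.2.2.2 with | none => y | some m => if y > m then y else m))) s
        = (PySem.List.pyRange 0 W 1).foldl (fun s x => pvStepA p s (y, x)) s := by
      intro s y _
      refine PySem.List.foldl_congr_mem _ _ _ _ (fun s' x _ => ?_)
      simp only [pvStepA, hp]
      by_cases h : (if y < prev_h ∧ x < prev_w then PySem.List.pyGetD (PySem.List.pyGetD pf y []) x 0 else -1)
        = (if y < curr_h ∧ x < curr_w then PySem.List.pyGetD (PySem.List.pyGetD cf y []) x 0 else -1) <;>
        simp [h]
    rw [PySem.List.foldl_congr_mem _ _ _ _ h1, pv_nested_foldl, pv_stateA, hcoords, hYs, hBx,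
      pv_filter_cells]
  rw [hA]
  -- B's row summaries
  have hrow : ∀ y,
      (PySem.List.pyRange 0 W 1).foldl (fun s x =>
        if (if y < prev_h ∧ x < prev_w then PySem.List.pyGetD (PySem.List.pyGetD pf y []) x 0 else -1)
         ≠ (if y < curr_h ∧ x < curr_w then PySem.List.pyGetD (PySem.List.pyGetD cf y []) x 0 else -1)
        then (s.1 + 1, if s.2.1 < 0 then x else s.2.1, x)
        else s) ((0 : Int), (-1 : Int), (-1 : Int))
      = (((Bx y).length : Int), (Bx y).headD (-1), (Bx y).getLastD (-1)) := by
    intro y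
    have hcong : ∀ (s : Int × Int × Int) (x : Int), x ∈ PySem.List.pyRange 0 W 1 →
        (if (if y < prev_h ∧ x < prev_w then PySem.List.pyGetD (PySem.List.pyGetD pf y []) x 0 else -1)
          ≠ (if y < curr_h ∧ x < curr_w then PySem.List.pyGetD (PySem.List.pyGetD cf y []) x 0 else -1)
         then (s.1 + 1, if s.2.1 < 0 then x else s.2.1, x)
         else s)
        = (if p y x then (s.1 + 1, if s.2.1 < 0 then x else s.2.1, x) else s) := by
      intro s x _
      simp only [hp]
      by_cases h : (if y < prev_h ∧ x < prev_w then PySem.List.pyGetD (PySem.List.pyGetD pf y []) x 0 else -1)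
        = (if y < curr_h ∧ x < curr_w then PySem.List.pyGetD (PySem.List.pyGetD cf y []) x 0 else -1) <;>
        simp [h]
    rw [PySem.List.foldl_congr_mem _ _ _ _ hcong,
      pv_rowfold_neg (p y) _ (fun x hx => (PySem.List.mem_pyRange_one.mp hx).1) 0 (-1)]
    simp [hBx]
  -- B's rows / changed lists in terms of Bx
  have hrows : (PySem.List.pyRange 0 H 1).map (fun y =>
      (PySem.List.pyRange 0 W 1).foldl (fun s x =>
        if (if y < prev_h ∧ x < prev_w then PySem.List.pyGetD (PySem.List.pyGetD pf y []) x 0 else -1)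
         ≠ (if y < curr_h ∧ x < curr_w then PySem.List.pyGetD (PySem.List.pyGetD cf y []) x 0 else -1)
        then (s.1 + 1, if s.2.1 < 0 then x else s.2.1, x)
        else s) ((0 : Int), (-1 : Int), (-1 : Int)))
      = Ys.map (fun y => (((Bx y).length : Int), (Bx y).headD (-1), (Bx y).getLastD (-1))) := by
    rw [hYs]
    exact List.map_congr_left (fun y _ => hrow y)
  rw [hrows]
  have henum : PySem.List.enumerate (Ys.map (fun y => (((Bx y).length : Int), (Bx y).headD (-1), (Bx y).getLastD (-1)))) 0
      = Ys.map (fun y => (y, (((Bx y).length : Int), (Bx y).headD (-1), (Bx y).getLastD (-1)))) := by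
    rw [hYs]
    exact pv_enum_map_pyRange _ H (H - 0).toNat 0 rfl
  rw [henum]
  -- changed = (rows with a change), expressed over Bx
  have hchanged :
      ((Ys.map (fun y => (y, (((Bx y).length : Int), (Bx y).headD (-1), (Bx y).getLastD (-1))))).filter
          (fun q => decide (q.2.1 > 0))).map (fun q => (q.1, q.2.2.1, q.2.2.2))
      = (Ys.filter (fun y => !(Bx y).isEmpty)).map
          (fun y => (y, (Bx y).headD (-1), (Bx y).getLastD (-1))) := by
    rw [List.filter_map, List.map_map]
    have : (Ys.filter ((fun (q : Int × Int × Int × Int) => decide (q.2.1 > 0)) ∘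
        (fun y => (y, (((Bx y).length : Int), (Bx y).headD (-1), (Bx y).getLastD (-1))))))
        = Ys.filter (fun y => !(Bx y).isEmpty) := by
      refine List.filter_congr (fun y _ => ?_)
      simp only [Function.comp_apply]
      cases hBy : Bx y with
      | nil => simp
      | cons a u => simp
    rw [this]
    rfl
  rw [hchanged]
  -- the two emptiness tests agree
  set Cy : List Int := Ys.filter (fun y => !(Bx y).isEmpty) with hCy
  have hempty : coords = [] ↔ Cy = [] := by
    rw [hcoords, hCy, List.flatMap_eq_nil_iff, List.filter_eq_nil_iff]
    constructor
    · intro h y hy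
      have := h y hy
      simp only [List.map_eq_nil_iff] at this
      simp [this]
    · intro h y hy
      have := h y hy
      simp only [Bool.not_eq_true', List.isEmpty_eq_false_iff, not_not] at this
      simp [this]
  by_cases hc : coords = []
  · rw [if_pos (by simp [pvStateOf, hc]), if_pos (by simp [List.map_eq_nil_iff, hempty.mp hc])]
  · have hCne : Cy ≠ [] := fun h => hc (hempty.mpr h)
    have hCmapne : (Cy.map (fun y => (y, (Bx y).headD (-1), (Bx y).getLastD (-1)))) ≠ [] := by
      simp [List.map_eq_nil_iff, hCne]
    have hlenpos : ¬ ((pvStateOf coords).1 ≤ 0) := by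
      simp only [pvStateOf]
      have : coords.length ≠ 0 := fun h => hc (List.eq_nil_of_length_eq_zero h)
      omega
    rw [if_neg hlenpos, if_neg hCmapne]
    -- componentwise
    have hxs : coords.map (fun c => c.1) = Ys.flatMap Bx := by
      rw [hcoords, List.map_flatMap]
      refine List.flatMap_congr (fun y _ => ?_)
      simp [List.map_map, Function.comp_def]
    have hys : coords.map (fun c => c.2) = Ys.flatMap (fun y => (Bx y).map (fun _ => y)) := by
      rw [hcoords, List.map_flatMap]
      refine List.flatMap_congr (fun y _ => ?_)
      simp [List.map_map, Function.comp_def]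
    simp only [pvStateOf, hxs, hys]
    -- length component
    have hlen : ((coords.length : Int))
        = ((Ys.map (fun y => (((Bx y).length : Int), (Bx y).headD (-1), (Bx y).getLastD (-1)))).map
            (fun r => r.1)).sum := by
      rw [hcoords]
      have : coords.length = (Ys.flatMap Bx).length := by
        rw [← hxs, List.length_map]
      rw [hcoords] at this
      rw [this, pv_flat_len, List.map_map]
      rfl
    rw [hcoords] at hlen
    -- min_x / max_x components
    have hminx : pvOMin (Ys.flatMap Bx)
        = PySem.List.min? ((Cy.map (fun y => (y, (Bx y).headD (-1), (Bx y).getLastD (-1)))).map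
            (fun q => q.2.1)) (fun v => v) := by
      rw [pvMin_eq, List.map_map, pv_flat_minx Bx Ys (fun y _ => hsortedX y), hCy]
      rfl
    have hmaxx : pvOMax (Ys.flatMap Bx)
        = PySem.List.max? ((Cy.map (fun y => (y, (Bx y).headD (-1), (Bx y).getLastD (-1)))).map
            (fun q => q.2.2)) (fun v => v) := by
      rw [pvMax_eq, List.map_map, pv_flat_maxx Bx Ys (fun y _ => hsortedX y), hCy]
      rfl
    -- min_y / max_y components
    have hminy : (pvOMin (Ys.flatMap (fun y => (Bx y).map (fun _ => y)))).getD 0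
        = ((Cy.map (fun y => (y, (Bx y).headD (-1), (Bx y).getLastD (-1)))).headD (0, 0, 0)).1 := by
      rw [pv_flat_miny Bx Ys hsortedY, ← hCy]
      cases hc2 : Cy with
      | nil => exact absurd hc2 hCne
      | cons a t => simp
    have hmaxy : (pvOMax (Ys.flatMap (fun y => (Bx y).map (fun _ => y)))).getD 0
        = ((Cy.map (fun y => (y, (Bx y).headD (-1), (Bx y).getLastD (-1)))).getLastD (0, 0, 0)).1 := by
      rw [pv_flat_maxy Bx Ys hsortedY, ← hCy]
      cases hc3 : Cy with
      | nil => exact absurd hc3 hCne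
      | cons a t =>
        rw [List.getLast?_eq_some_getLast (by simp), Option.getD_some,
          List.getLastD_eq_getLast?, List.getLast?_eq_some_getLast (by simp), Option.getD_some,
          List.getLast_map]
    rw [hlen, hminx, hmaxx, hminy, hmaxy]
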